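-- pv_equiv track=rewrite | github.com/rballachay/protein_property_prediction | src/preprocess.py | generate_cartesian_products
-- ===== SOURCE A (Python) =====
-- def generate_cartesian_products(AMINO_ACIDS):
--     trimers = []
--     dimers = []
--     monomers = []
--
--     for AA1 in AMINO_ACIDS:
--         monomers.append(AA1)
--         for AA2 in AMINO_ACIDS:
--             dimers.append(AA1+AA2)
--             for AA3 in AMINO_ACIDS:
--                 trimers.append(AA1+AA2+AA3)
--
--     return monomers,dimers,trimers
-- ===== SOURCE B (Python) =====
-- def generate_cartesian_products(AMINO_ACIDS):
--     # Build each level from the previous one: monomers -> dimers -> trimers.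
--     monomers = list(AMINO_ACIDS)
--     dimers = [m + a for m in monomers for a in AMINO_ACIDS]
--     trimers = [d + a for d in dimers for a in AMINO_ACIDS]
--     return monomers, dimers, trimers
-- ===== Notes on version B (the rewrite author's own statement) =====
-- stated objective: simpler
-- what changed: Replaces the single triple-nested loop with three chained passes: monomers copied from the alphabet, dimers built from monomers, trimers built by extending the dimers list, so no loop nests more than two deep.
import Mathlib
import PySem

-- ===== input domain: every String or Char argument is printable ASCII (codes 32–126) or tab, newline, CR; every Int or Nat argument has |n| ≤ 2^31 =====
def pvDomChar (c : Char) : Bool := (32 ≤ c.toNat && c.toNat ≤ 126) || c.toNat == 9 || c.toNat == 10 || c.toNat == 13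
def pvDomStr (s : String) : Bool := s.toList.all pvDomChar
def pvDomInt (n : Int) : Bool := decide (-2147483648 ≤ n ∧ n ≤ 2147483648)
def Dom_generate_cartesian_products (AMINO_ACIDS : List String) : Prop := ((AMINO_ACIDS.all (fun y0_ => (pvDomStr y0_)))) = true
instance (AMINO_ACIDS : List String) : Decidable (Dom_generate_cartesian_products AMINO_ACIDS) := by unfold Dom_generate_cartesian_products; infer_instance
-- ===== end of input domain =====

-- B builds dimers from monomers and trimers from the dimers list in three chained passes
-- instead of A's single triple-nested loop (objective: simpler; return value proved equal).

-- ===== PORT A =====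
-- A: one triple-nested loop appending into three accumulators.
def generate_cartesian_products (AMINO_ACIDS : List String) : List String × List String × List String :=
  let st := AMINO_ACIDS.foldl
    (fun (acc : List String × List String × List String) AA1 =>
      let monomers := acc.1 ++ [AA1]
      let inner := AMINO_ACIDS.foldl
        (fun (acc2 : List String × List String) AA2 =>
          let dimers := acc2.1 ++ [AA1 ++ AA2]
          let trimers := AMINO_ACIDS.foldl
            (fun (t : List String) AA3 => t ++ [AA1 ++ AA2 ++ AA3]) acc2.2
          (dimers, trimers))
        (acc.2.1, acc.2.2)
      (monomers, inner.1, inner.2))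
    ([], [], [])
  (st.1, st.2.1, st.2.2)

-- ===== PORT B =====
-- B: three chained passes, each level built from the previous level's list.
def generate_cartesian_products_alt (AMINO_ACIDS : List String) : List String × List String × List String :=
  let monomers := AMINO_ACIDS
  let dimers := monomers.flatMap (fun m => AMINO_ACIDS.map (fun a => m ++ a))
  let trimers := dimers.flatMap (fun d => AMINO_ACIDS.map (fun a => d ++ a))
  (monomers, dimers, trimers)

-- ===== PRECONDITION & SPEC =====
def Spec_generate_cartesian_products (AMINO_ACIDS : List String) (out : List String × List String × List String) : Prop := out = generate_cartesian_products_alt AMINO_ACIDS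
instance (AMINO_ACIDS : List String) (out : List String × List String × List String) : Decidable (Spec_generate_cartesian_products AMINO_ACIDS out) := by unfold Spec_generate_cartesian_products; infer_instance

-- ===== CLAIM (what is proved, stated in full; the proofs are below) =====
def Claim_equal_generate_cartesian_products : Prop := ∀ (AMINO_ACIDS : List String), Dom_generate_cartesian_products AMINO_ACIDS → Spec_generate_cartesian_products AMINO_ACIDS (generate_cartesian_products AMINO_ACIDS)

-- ===== LEMMAS AND PROOFS =====

-- innermost loop: appends the map of the alphabet under (AA1++AA2++·)
theorem pv_inner3 (L : List String) (p : String) (t : List String) :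
    L.foldl (fun (t : List String) AA3 => t ++ [p ++ AA3]) t
      = t ++ L.map (fun a => p ++ a) := by
  induction L generalizing t with
  | nil => simp
  | cons x xs ih => simp [List.foldl, ih, List.append_assoc]

-- middle loop over iteration list M (alphabet L fixed)
theorem pv_inner2 (L M : List String) (AA1 : String) (d t : List String) :
    M.foldl
      (fun (acc2 : List String × List String) AA2 =>
        (acc2.1 ++ [AA1 ++ AA2],
         L.foldl (fun (t : List String) AA3 => t ++ [AA1 ++ AA2 ++ AA3]) acc2.2))
      (d, t)
      = (d ++ M.map (fun a => AA1 ++ a),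
         t ++ M.flatMap (fun a => L.map (fun b => (AA1 ++ a) ++ b))) := by
  induction M generalizing d t with
  | nil => simp
  | cons x xs ih =>
    simp only [List.foldl_cons]
    simp only [ih]
    rw [pv_inner3]
    simp [List.append_assoc, String.append_assoc]

-- outer loop over iteration list M
theorem pv_outer (L M : List String) (m d t : List String) :
    M.foldl
      (fun (acc : List String × List String × List String) AA1 =>
        let inner := L.foldl
          (fun (acc2 : List String × List String) AA2 =>
            (acc2.1 ++ [AA1 ++ AA2],
             L.foldl (fun (t : List String) AA3 => t ++ [AA1 ++ AA2 ++ AA3]) acc2.2))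
          (acc.2.1, acc.2.2)
        (acc.1 ++ [AA1], inner.1, inner.2))
      (m, d, t)
      = (m ++ M,
         d ++ M.flatMap (fun x => L.map (fun a => x ++ a)),
         t ++ (M.flatMap (fun x => L.map (fun a => x ++ a))).flatMap
                (fun d' => L.map (fun b => d' ++ b))) := by
  induction M generalizing m d t with
  | nil => simp
  | cons x xs ih =>
    simp only [List.foldl_cons]
    simp only [ih]
    rw [pv_inner2]
    simp [List.flatMap_append, List.flatMap_map, List.append_assoc]

-- ===== VERDICT (by name: the statement is the Claim_ definition above) =====
theorem generate_cartesian_products_spec : Claim_equal_generate_cartesian_products := by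
  intro L _
  show _ = _
  simp only [generate_cartesian_products, generate_cartesian_products_alt]
  rw [show (fun (acc : List String × List String × List String) AA1 =>
      let monomers := acc.1 ++ [AA1]
      let inner := L.foldl
        (fun (acc2 : List String × List String) AA2 =>
          let dimers := acc2.1 ++ [AA1 ++ AA2]
          let trimers := L.foldl
            (fun (t : List String) AA3 => t ++ [AA1 ++ AA2 ++ AA3]) acc2.2
          (dimers, trimers))
        (acc.2.1, acc.2.2)
      (monomers, inner.1, inner.2))
    = (fun (acc : List String × List String × List String) AA1 =>
        let inner := L.foldl
          (fun (acc2 : List String × List String) AA2 =>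
            (acc2.1 ++ [AA1 ++ AA2],
             L.foldl (fun (t : List String) AA3 => t ++ [AA1 ++ AA2 ++ AA3]) acc2.2))
          (acc.2.1, acc.2.2)
        (acc.1 ++ [AA1], inner.1, inner.2)) from rfl]
  rw [pv_outer L L [] [] []]
  simp
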